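-- pv_equiv track=rewrite | github.com/MShverdiakov/matrix-support | src/core/game_analyzer.py | remove_unmentioned_columns
-- ===== SOURCE A (Python) =====
-- def remove_unmentioned_columns(matrix):
--     """Удаляет столбцы, которые не содержат максимумов в строках"""
--     rows = len(matrix)
--     cols = len(matrix[0])
--
--     # Шаг 1: Найти максимумы в каждой строке и сохранить номера столбцов
--     mentioned_cols = set()
--     for row in matrix:
--         max_value = max(row)  # Находим максимум в строке
--         for col_index in range(cols):
--             if row[col_index] == max_value:
--                 mentioned_cols.add(col_index)  # Запоминаем столбец, содержащий максимум
--
--     # Шаг 2: Найти все столбцы, которые не упоминались в максимумах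
--     unmentioned_cols = [col_index for col_index in range(cols) if col_index not in mentioned_cols]
--
--     if not unmentioned_cols:
--         return matrix  # Если все столбцы были упомянуты, ничего не удаляем
--
--     # Удаляем все столбцы, которые не упоминались
--     new_matrix = [[row[col] for col in range(cols) if col not in unmentioned_cols] for row in matrix]
--     return new_matrix
-- ===== SOURCE B (Python) =====
-- def remove_unmentioned_columns(matrix):
--     """Удаляет столбцы, которые не содержат максимумов в строках"""
--     cols = len(matrix[0])
--     row_maxes = [max(row) for row in matrix]
--     columns = list(zip(*matrix))
--     kept = [col for col in columns if any(v == m for v, m in zip(col, row_maxes))]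
--     if len(kept) == cols:
--         return matrix
--     return [list(t) for t in zip(*kept)]
-- ===== Notes on version B (the rewrite author's own statement) =====
-- stated objective: alternative
-- what changed: B transposes the matrix with zip(*matrix) and works on columns as first-class lists -- filtering the column list against the precomputed row maxima and transposing back -- instead of A's index-based double loop that accumulates a 'mentioned' index set and then rebuilds rows with a per-cell 'col not in unmentioned' list scan.
import Mathlib
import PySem

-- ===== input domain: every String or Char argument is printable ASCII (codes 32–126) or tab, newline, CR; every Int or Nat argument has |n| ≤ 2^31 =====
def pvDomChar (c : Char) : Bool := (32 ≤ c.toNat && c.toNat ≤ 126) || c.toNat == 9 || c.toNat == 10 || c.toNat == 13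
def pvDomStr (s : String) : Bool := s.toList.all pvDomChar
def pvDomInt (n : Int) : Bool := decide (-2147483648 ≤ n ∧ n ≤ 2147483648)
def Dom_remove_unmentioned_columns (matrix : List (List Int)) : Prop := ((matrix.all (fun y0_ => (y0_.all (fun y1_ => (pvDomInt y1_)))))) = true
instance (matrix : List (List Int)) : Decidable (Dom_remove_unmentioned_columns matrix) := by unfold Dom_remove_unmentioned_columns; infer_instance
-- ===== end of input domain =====

-- B works on the transposed matrix: it materialises the columns with zip(*matrix), filters
-- them as lists against the precomputed row maxima, and transposes back — replacing A's
-- index-based double loop over a 'mentioned' set and its per-cell 'col not in unmentioned'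
-- list scan during the rebuild.

-- ===== PORT A =====
def remove_unmentioned_columns (matrix : List (List Int)) : List (List Int) :=
  let cols : Int := ((PySem.List.pyGet? matrix 0).getD []).length
  let mentioned : PySem.Set Int := matrix.foldl (fun s row =>
    (PySem.List.pyRange 0 cols 1).foldl (fun s ci =>
      if PySem.List.pyGetD row ci 0 = (PySem.List.max? row (fun x => x)).getD 0
      then PySem.Set.add s ci else s) s)
    PySem.Set.empty
  let unmentioned : List Int :=
    (PySem.List.pyRange 0 cols 1).filter (fun c => !(PySem.Set.contains mentioned c))
  if unmentioned = [] then matrix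
  else matrix.map (fun row =>
    ((PySem.List.pyRange 0 cols 1).filter (fun c => decide (c ∉ unmentioned))).map
      (fun c => PySem.List.pyGetD row c 0))

-- ===== PORT B =====
-- zip(*m): Python's zip over all rows — stops at the shortest row; exact hand port.
def pyZipStar (m : List (List Int)) : List (List Int) :=
  if h : m = [] ∨ m.any (·.isEmpty) then []
  else (m.map (·.headI)) :: pyZipStar (m.map (·.tail))
termination_by m.headI.length
decreasing_by
  rw [not_or] at h
  obtain ⟨h1, h2⟩ := h
  cases m with
  | nil => exact absurd rfl h1
  | cons a t =>
    simp only [List.any_cons, Bool.or_eq_true, not_or] at h2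
    cases a with
    | nil => simp at h2
    | cons x xs => simp

def remove_unmentioned_columns_alt (matrix : List (List Int)) : List (List Int) :=
  let cols : Int := ((PySem.List.pyGet? matrix 0).getD []).length
  let row_maxes : List Int := matrix.map (fun row => (PySem.List.max? row (fun x => x)).getD 0)
  let columns : List (List Int) := pyZipStar matrix
  let kept : List (List Int) := columns.filter (fun col =>
    (col.zip row_maxes).any (fun p => decide (p.1 = p.2)))
  if (kept.length : Int) = cols then matrix
  else pyZipStar kept   -- [list(t) for t in zip(*kept)] : list(t) is the identity here

-- ===== PRECONDITION & SPEC =====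
-- Pre_ excludes exactly the inputs on which A raises: the empty matrix (IndexError on
-- matrix[0]), an empty first row (ValueError from max on an empty row), and a row shorter
-- than the first row (IndexError on row[col_index]).
def Pre_remove_unmentioned_columns (matrix : List (List Int)) : Prop :=
  matrix ≠ [] ∧ 0 < matrix.headI.length ∧ ∀ row ∈ matrix, matrix.headI.length ≤ row.length
instance (matrix : List (List Int)) : Decidable (Pre_remove_unmentioned_columns matrix) := by
  unfold Pre_remove_unmentioned_columns; infer_instance

def pvWitness_remove_unmentioned_columns : List (List Int) := [[1, 2], [3, 1]]

def Spec_remove_unmentioned_columns (matrix : List (List Int)) (out : List (List Int)) : Prop :=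
  out = remove_unmentioned_columns_alt matrix
instance (matrix : List (List Int)) (out : List (List Int)) :
    Decidable (Spec_remove_unmentioned_columns matrix out) := by
  unfold Spec_remove_unmentioned_columns; infer_instance

-- ===== CLAIM (what is proved, stated in full; the proofs are below) =====
def Claim_equal_remove_unmentioned_columns : Prop :=
  ∀ (matrix : List (List Int)), Dom_remove_unmentioned_columns matrix →
    Pre_remove_unmentioned_columns matrix →
    Spec_remove_unmentioned_columns matrix (remove_unmentioned_columns matrix)

-- ===== LEMMAS AND PROOFS =====

-- membership in A's 'mentioned' set after the row-by-row double loop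
theorem pv_mem_mentioned (L : List (List Int)) (cols : Int) (s : PySem.Set Int) (c : Int) :
    c ∈ L.foldl (fun s row =>
        (PySem.List.pyRange 0 cols 1).foldl (fun s ci =>
          if PySem.List.pyGetD row ci 0 = (PySem.List.max? row (fun x => x)).getD 0
          then PySem.Set.add s ci else s) s) s ↔
      c ∈ s ∨ ∃ row ∈ L, c ∈ PySem.List.pyRange 0 cols 1 ∧
        PySem.List.pyGetD row c 0 = (PySem.List.max? row (fun x => x)).getD 0 := by
  induction L generalizing s with
  | nil => simp
  | cons row L ih =>
    simp only [List.foldl_cons, ih]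
    rw [PySem.List.foldl_ite_eq_foldl_filter]
    rw [show (PySem.Set.add : PySem.Set Int → Int → PySem.Set Int)
        = (fun (s : PySem.Set Int) (ci : Int) => PySem.Set.add s ((fun x => x) ci)) from rfl]
    rw [PySem.Set.mem_foldl_add]
    constructor
    · rintro ((h | ⟨b, hb, rfl⟩) | h)
      · exact Or.inl h
      · simp only [List.mem_filter, decide_eq_true_eq] at hb
        exact Or.inr ⟨row, by simp, hb.1, hb.2⟩
      · obtain ⟨r, hr, h1, h2⟩ := h
        exact Or.inr ⟨r, List.mem_cons_of_mem _ hr, h1, h2⟩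
    · rintro (h | ⟨r, hr, h1, h2⟩)
      · exact Or.inl (Or.inl h)
      · rcases List.mem_cons.1 hr with rfl | hr
        · exact Or.inl (Or.inr ⟨c, by simp [List.mem_filter, h1, h2], rfl⟩)
        · exact Or.inr ⟨r, hr, h1, h2⟩

-- the per-column predicate both sides reduce to
def pvHit (matrix : List (List Int)) (c : Int) : Bool :=
  matrix.any (fun r => decide
    (PySem.List.pyGetD r c 0 = (PySem.List.max? r (fun x => x)).getD 0))

-- on each column of the range, A's 'mentioned' test agrees with pvHit
theorem pv_pred_agree (matrix : List (List Int)) (cols : Int) (c : Int)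
    (hc : c ∈ PySem.List.pyRange 0 cols 1) :
    PySem.Set.contains (matrix.foldl (fun s row =>
        (PySem.List.pyRange 0 cols 1).foldl (fun s ci =>
          if PySem.List.pyGetD row ci 0 = (PySem.List.max? row (fun x => x)).getD 0
          then PySem.Set.add s ci else s) s) PySem.Set.empty) c
      = pvHit matrix c := by
  rw [Bool.eq_iff_iff]
  simp only [pvHit, PySem.Set.contains_eq_listContains, List.contains_eq_mem,
    decide_eq_true_eq, List.any_eq_true, pv_mem_mentioned, PySem.Set.empty,
    List.not_mem_nil, false_or]
  constructor
  · rintro ⟨r, hr, _, heq⟩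
    exact ⟨r, hr, heq⟩
  · rintro ⟨r, hr, heq⟩
    exact ⟨r, hr, hc, heq⟩

-- zip(*m) when some row has exactly n entries and all rows have at least n
theorem pv_zipstar_eq (n : Nat) (m : List (List Int)) (hm : m ≠ [])
    (hge : ∀ row ∈ m, n ≤ row.length) (hex : ∃ row ∈ m, row.length = n) :
    pyZipStar m = (List.range n).map (fun i => m.map (fun row => row.getD i 0)) := by
  induction n generalizing m with
  | zero =>
    obtain ⟨r, hr, hlen⟩ := hex
    rw [pyZipStar]
    rw [dif_pos (Or.inr (List.any_eq_true.2 ⟨r, hr, by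
      simp [List.length_eq_zero_iff.1 hlen]⟩))]
    simp
  | succ n ih =>
    have hne : ∀ row ∈ m, row ≠ [] := by
      intro row hrow h
      have := hge row hrow
      simp [h] at this
    rw [pyZipStar]
    rw [dif_neg (by
      rintro (h | h)
      · exact hm h
      · obtain ⟨r, hr, hemp⟩ := List.any_eq_true.1 h
        exact hne r hr (by simpa using hemp))]
    have htail : pyZipStar (m.map (·.tail))
        = (List.range n).map (fun i => (m.map (·.tail)).map (fun row => row.getD i 0)) := by
      apply ih
      · simp [hm]
      · intro r hr
        obtain ⟨r0, hr0, rfl⟩ := List.mem_map.1 hr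
        have := hge r0 hr0
        simp only [List.length_tail]
        omega
      · obtain ⟨r, hr, hlen⟩ := hex
        exact ⟨r.tail, List.mem_map.2 ⟨r, hr, rfl⟩, by simp [List.length_tail, hlen]⟩
    rw [htail, List.range_succ_eq_map]
    simp only [List.map_cons, List.map_map]
    congr 1
    · apply List.map_congr_left
      intro r hr
      cases r with
      | nil => exact absurd rfl (hne [] hr)
      | cons a t => simp
    · apply List.map_congr_left
      intro i _
      simp only [Function.comp]
      apply List.map_congr_left
      intro r _
      cases r with
      | nil => simp
      | cons a t => simp [List.getD]

-- transposing back a nonempty list of full-height columns gives the row view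
theorem pv_zipstar_cols (idxs : List Int) (m : List (List Int)) (hm : m ≠ [])
    (hidx : idxs ≠ []) :
    pyZipStar (idxs.map (fun c => m.map (fun row => PySem.List.pyGetD row c 0)))
      = m.map (fun row => idxs.map (fun c => PySem.List.pyGetD row c 0)) := by
  induction m with
  | nil => exact absurd rfl hm
  | cons r m' ih =>
    rw [pyZipStar]
    rw [dif_neg (by
      rintro (h | h)
      · exact hidx (List.map_eq_nil_iff.1 h)
      · obtain ⟨col, hcol, hemp⟩ := List.any_eq_true.1 h
        obtain ⟨c, _, rfl⟩ := List.mem_map.1 hcol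
        simp at hemp)]
    simp only [List.map_cons, List.headI_cons, List.tail_cons, List.map_map, Function.comp]
    congr 1
    by_cases hm' : m' = []
    · subst hm'
      rw [pyZipStar]
      rw [dif_pos (by
        right
        obtain ⟨c, hc⟩ := List.exists_mem_of_ne_nil idxs hidx
        exact List.any_eq_true.2 ⟨[], List.mem_map.2 ⟨c, hc, by simp⟩, by simp⟩)]
      simp
    · exact ih hm'

-- ===== VERDICT (by name: the statement is the Claim_ definition above) =====
theorem remove_unmentioned_columns_spec : Claim_equal_remove_unmentioned_columns := by
  intro matrix _ hpre
  obtain ⟨hne, hpos, hlen⟩ := hpre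
  unfold Spec_remove_unmentioned_columns
  show remove_unmentioned_columns matrix = remove_unmentioned_columns_alt matrix
  have hhead : matrix.headI ∈ matrix := by
    cases matrix with
    | nil => exact absurd rfl hne
    | cons r t => simp
  have hget : PySem.List.pyGet? matrix 0 = some matrix.headI := by
    cases matrix with
    | nil => exact absurd rfl hne
    | cons r t => simp [PySem.List.pyGet?, PySem.List.pyIdx?]
  -- B's column list is the indexed column view
  have hZS : pyZipStar matrix = (List.range matrix.headI.length).map
      (fun i => matrix.map (fun row => row.getD i 0)) :=
    pv_zipstar_eq matrix.headI.length matrix hne hlen ⟨matrix.headI, hhead, rfl⟩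
  -- B's per-column test is pvHit
  have hpcol : ∀ i : Nat,
      (((matrix.map (fun row => row.getD i 0)).zip
          (matrix.map (fun row => (PySem.List.max? row (fun x => x)).getD 0))).any
        (fun p => decide (p.1 = p.2))) = pvHit matrix (i : Int) := by
    intro i
    rw [List.zip_map', List.any_map]
    simp [pvHit, Function.comp_def]
  -- B's kept column list, through the Nat index list
  have hkept : ((List.range matrix.headI.length).map
        (fun i => matrix.map (fun row => row.getD i 0))).filter
        (fun col => (col.zip
          (matrix.map (fun row => (PySem.List.max? row (fun x => x)).getD 0))).any
          (fun p => decide (p.1 = p.2)))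
      = ((List.range matrix.headI.length).filter
          (fun (i : Nat) => pvHit matrix (i : Int))).map
          (fun i => matrix.map (fun row => row.getD i 0)) := by
    rw [List.filter_map]
    exact congrArg _ (List.filter_congr (fun i _ => hpcol i))
  have hrange : PySem.List.pyRange 0 (matrix.headI.length : Int) 1
      = (List.range matrix.headI.length).map (fun (k : Nat) => (k : Int)) := by
    rw [PySem.List.pyRange_one]; simp
  -- A's mentioned-set test agrees with pvHit on the range
  have hAgree : ∀ c ∈ PySem.List.pyRange 0 (matrix.headI.length : Int) 1,
      PySem.Set.contains (matrix.foldl (fun s row =>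
        (PySem.List.pyRange 0 (matrix.headI.length : Int) 1).foldl (fun s ci =>
          if PySem.List.pyGetD row ci 0 = (PySem.List.max? row (fun x => x)).getD 0
          then PySem.Set.add s ci else s) s) PySem.Set.empty) c = pvHit matrix c :=
    fun c hc => pv_pred_agree matrix (matrix.headI.length : Int) c hc
  -- A's unmentioned list in Nat form
  have hunm : (PySem.List.pyRange 0 (matrix.headI.length : Int) 1).filter (fun c =>
        !(PySem.Set.contains (matrix.foldl (fun s row =>
          (PySem.List.pyRange 0 (matrix.headI.length : Int) 1).foldl (fun s ci =>
            if PySem.List.pyGetD row ci 0 = (PySem.List.max? row (fun x => x)).getD 0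
            then PySem.Set.add s ci else s) s) PySem.Set.empty) c))
      = ((List.range matrix.headI.length).filter
          (fun (k : Nat) => !pvHit matrix (k : Int))).map (fun (k : Nat) => (k : Int)) := by
    rw [List.filter_congr (fun c hc => by rw [hAgree c hc])]
    rw [hrange, List.filter_map]
    simp [Function.comp_def]
  -- both guards say: every column index below headI.length is hit
  have hguardA : (((List.range matrix.headI.length).filter
        (fun (k : Nat) => !pvHit matrix (k : Int))).map (fun (k : Nat) => (k : Int)) = [])
      ↔ (∀ k ∈ List.range matrix.headI.length, pvHit matrix (k : Int)) := by
    rw [List.map_eq_nil_iff, List.filter_eq_nil_iff]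
    simp
  have hguardB : (((((List.range matrix.headI.length).filter
          (fun (i : Nat) => pvHit matrix (i : Int))).map
          (fun i => matrix.map (fun row => row.getD i 0))).length : Int)
        = (matrix.headI.length : Int))
      ↔ (∀ k ∈ List.range matrix.headI.length, pvHit matrix (k : Int)) := by
    rw [List.length_map, Nat.cast_inj]
    have h2 : ((List.range matrix.headI.length).filter
          (fun (i : Nat) => pvHit matrix (i : Int))).length
        = (List.range matrix.headI.length).length
      ↔ ∀ a ∈ List.range matrix.headI.length, pvHit matrix (a : Int) :=
      List.length_filter_eq_length_iff
    rw [List.length_range] at h2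
    exact h2
  -- the kept index list is nonempty: the first row's maximum sits at some index < headI.length
  have hkeptne : (List.range matrix.headI.length).filter
      (fun (i : Nat) => pvHit matrix (i : Int)) ≠ [] := by
    have hr0 : matrix.headI ≠ [] := List.ne_nil_of_length_pos hpos
    obtain ⟨v, hv⟩ : ∃ v, PySem.List.max? matrix.headI (fun x => x) = some v := by
      cases hmax : PySem.List.max? matrix.headI (fun x => x) with
      | none => exact absurd ((PySem.List.max?_eq_none_iff _ _).1 hmax) hr0
      | some v => exact ⟨v, rfl⟩
    obtain ⟨k, hk, hvk⟩ := List.getElem_of_mem (PySem.List.max?_mem hv)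
    have hhit : pvHit matrix (k : Int) = true := by
      rw [pvHit, List.any_eq_true]
      refine ⟨matrix.headI, hhead, ?_⟩
      rw [decide_eq_true_eq, PySem.List.pyGetD_natCast, List.getD_eq_getElem _ 0 hk, hvk, hv]
      rfl
    exact List.ne_nil_of_mem (List.mem_filter.2 ⟨List.mem_range.2 hk, hhit⟩)
  -- A's rebuilt rows read off exactly the kept indices
  have hAelse : ∀ row : List Int,
      ((PySem.List.pyRange 0 (matrix.headI.length : Int) 1).filter (fun c => decide
          (c ∉ ((List.range matrix.headI.length).filter
            (fun (k : Nat) => !pvHit matrix (k : Int))).map (fun (k : Nat) => (k : Int))))).map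
        (fun c => PySem.List.pyGetD row c 0)
      = (((List.range matrix.headI.length).filter
          (fun (i : Nat) => pvHit matrix (i : Int))).map (fun (k : Nat) => (k : Int))).map
        (fun c => PySem.List.pyGetD row c 0) := by
    intro row
    congr 1
    rw [hrange, List.filter_map]
    simp only [Function.comp_def]
    exact congrArg _ (List.filter_congr (fun x hx => by
      rw [Bool.eq_iff_iff, decide_eq_true_eq]
      constructor
      · intro h
        by_contra hno
        rw [Bool.not_eq_true] at hno
        exact h (List.mem_map.2 ⟨x, List.mem_filter.2 ⟨hx, by rw [hno]; rfl⟩, rfl⟩)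
      · intro hhit hmem
        obtain ⟨k, hkf, hkc⟩ := List.mem_map.1 hmem
        obtain ⟨-, hnot⟩ := List.mem_filter.1 hkf
        have hkk : k = x := by exact_mod_cast hkc
        subst hkk
        rw [hhit] at hnot
        simp at hnot))
  -- B's transpose-back gives the same rows
  have hBelse : pyZipStar (((List.range matrix.headI.length).filter
        (fun (i : Nat) => pvHit matrix (i : Int))).map
        (fun i => matrix.map (fun row => row.getD i 0)))
      = matrix.map (fun row => (((List.range matrix.headI.length).filter
          (fun (i : Nat) => pvHit matrix (i : Int))).map (fun (k : Nat) => (k : Int))).map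
          (fun c => PySem.List.pyGetD row c 0)) := by
    have hconv : ((List.range matrix.headI.length).filter
          (fun (i : Nat) => pvHit matrix (i : Int))).map
          (fun i => matrix.map (fun row => row.getD i 0))
        = (((List.range matrix.headI.length).filter
            (fun (i : Nat) => pvHit matrix (i : Int))).map (fun (k : Nat) => (k : Int))).map
          (fun c => matrix.map (fun row => PySem.List.pyGetD row c 0)) := by
      rw [List.map_map]
      apply List.map_congr_left
      intro k _
      simp [Function.comp_def]
    rw [hconv]
    exact pv_zipstar_cols _ matrix hne (fun h => hkeptne (List.map_eq_nil_iff.1 h))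
  -- assemble
  simp only [remove_unmentioned_columns, remove_unmentioned_columns_alt, hget,
    Option.getD_some, hZS, hkept, hunm, hBelse]
  by_cases hP : ∀ k ∈ List.range matrix.headI.length, pvHit matrix (k : Int)
  · rw [if_pos (hguardA.2 hP), if_pos (hguardB.2 hP)]
  · rw [if_neg (fun h => hP (hguardA.1 h)), if_neg (fun h => hP (hguardB.1 h))]
    exact List.map_congr_left (fun row _ => hAelse row)
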